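-- pv_equiv track=rewrite | github.com/MyoHub/myosuite | myosuite/logger/examine_reference.py | _map_joints_to_env
-- ===== SOURCE A (Python) =====
-- def _map_joints_to_env(motion_joint_names, env_joint_names):
--     """Map motion joint names to environment joint indices."""
--     joint_indices = []
--     for name in motion_joint_names:
--         if name in env_joint_names:
--             joint_indices.append(env_joint_names.index(name))
--         else:
--             # Try partial match
--             matches = [
--                 i
--                 for i, env_name in enumerate(env_joint_names)
--                 if name in env_name or env_name in name
--             ]
--             if matches:
--                 joint_indices.append(matches[0])
--             else:
--                 joint_indices.append(None)
--     return joint_indices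
-- ===== SOURCE B (Python) =====
-- def _map_joints_to_env(motion_joint_names, env_joint_names):
--     """Map motion joint names to environment joint indices (single early-exit pass per name)."""
--     out = []
--     for name in motion_joint_names:
--         exact = None
--         partial = None
--         for i, env_name in enumerate(env_joint_names):
--             if env_name == name:
--                 exact = i
--                 break
--             if partial is None and (name in env_name or env_name in name):
--                 partial = i
--         out.append(exact if exact is not None else partial)
--     return out
-- ===== Notes on version B (the rewrite author's own statement) =====
-- stated objective: alternative
-- what changed: A's two separate scans per motion name (exact membership test plus .index, then a full comprehension collecting all partial matches) are replaced by a single early-exit pass over enumerate(env_joint_names) that tracks the exact hit and the first partial hit.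
import Mathlib
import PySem

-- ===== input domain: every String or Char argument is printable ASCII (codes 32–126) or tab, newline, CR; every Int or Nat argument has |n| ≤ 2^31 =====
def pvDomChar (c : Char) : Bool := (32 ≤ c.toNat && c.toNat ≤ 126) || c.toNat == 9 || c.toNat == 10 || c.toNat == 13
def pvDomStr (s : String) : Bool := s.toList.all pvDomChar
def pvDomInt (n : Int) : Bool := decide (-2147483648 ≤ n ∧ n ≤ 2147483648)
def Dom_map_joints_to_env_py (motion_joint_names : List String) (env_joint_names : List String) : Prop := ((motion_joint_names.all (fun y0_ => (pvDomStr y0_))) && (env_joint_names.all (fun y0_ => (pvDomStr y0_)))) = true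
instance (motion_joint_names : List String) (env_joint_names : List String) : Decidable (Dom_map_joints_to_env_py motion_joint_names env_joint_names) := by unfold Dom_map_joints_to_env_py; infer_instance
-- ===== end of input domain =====

-- B replaces A's two scans per name (membership+.index, then a full comprehension) by ONE
-- early-exit pass tracking exact/partial; objective: alternative decomposition, same results.

-- ===== PORT A =====
-- loop body of A for one motion name: exact membership + .index, else first partial match of the comprehension
def pvAOne (name : String) (env : List String) : Option Int :=
  if env.contains name then
    (PySem.List.index? env name).map (fun k => (k : Int))
  else
    (((PySem.List.enumerate env 0).filter
        (fun p => PySem.Str.isIn name p.2 || PySem.Str.isIn p.2 name)).head?).map (·.1)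

def map_joints_to_env_py (motion_joint_names : List String) (env_joint_names : List String) : List (Option Int) :=
  motion_joint_names.foldl (fun acc name => acc ++ [pvAOne name env_joint_names]) []

-- ===== PORT B =====
-- B's inner loop: single pass with index i and the first partial match seen so far; break on exact
def pvBScan (name : String) : List String → Int → Option Int → Option Int
  | [], _, part => part
  | env_name :: rest, i, part =>
    if env_name == name then some i
    else pvBScan name rest (i + 1)
      (if part.isNone && (PySem.Str.isIn name env_name || PySem.Str.isIn env_name name)
       then some i else part)

def map_joints_to_env_py_alt (motion_joint_names : List String) (env_joint_names : List String) : List (Option Int) :=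
  motion_joint_names.map (fun name => pvBScan name env_joint_names 0 none)

-- ===== PRECONDITION & SPEC =====
def Spec_map_joints_to_env_py (motion_joint_names : List String) (env_joint_names : List String) (out : List (Option Int)) : Prop := out = map_joints_to_env_py_alt motion_joint_names env_joint_names
instance (motion_joint_names : List String) (env_joint_names : List String) (out : List (Option Int)) : Decidable (Spec_map_joints_to_env_py motion_joint_names env_joint_names out) := by unfold Spec_map_joints_to_env_py; infer_instance

-- ===== CLAIM (what is proved, stated in full; the proofs are below) =====
def Claim_equal_map_joints_to_env_py : Prop := ∀ (motion_joint_names : List String) (env_joint_names : List String), Dom_map_joints_to_env_py motion_joint_names env_joint_names → Spec_map_joints_to_env_py motion_joint_names env_joint_names (map_joints_to_env_py motion_joint_names env_joint_names)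

-- ===== LEMMAS AND PROOFS =====

-- general invariant of B's scan: exact match wins (offset by i), otherwise the earlier
-- partial (part) or the first partial of the rest of the list
theorem pvBScan_eq (name : String) : ∀ (env : List String) (i : Int) (part : Option Int),
    pvBScan name env i part =
      match PySem.List.index? env name with
      | some k => some (i + k)
      | none => part.orElse (fun _ =>
          (((PySem.List.enumerate env i).filter
              (fun p => PySem.Str.isIn name p.2 || PySem.Str.isIn p.2 name)).head?).map (·.1))
  | [], i, part => by simp [pvBScan, PySem.List.index?]
  | e :: rest, i, part => by
    by_cases he : e = name
    · subst he
      rw [PySem.List.index?_cons_self]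
      simp [pvBScan]
    · have hne : (e == name) = false := by simp [he]
      rw [PySem.List.index?_cons_of_ne rest he]
      simp only [pvBScan, hne, Bool.false_eq_true, if_false]
      rw [pvBScan_eq name rest (i + 1)]
      cases hidx : PySem.List.index? rest name with
      | some k =>
        simp only [Option.map_some]
        congr 1
        push_cast
        ring
      | none =>
        simp only [Option.map_none]
        rw [PySem.List.enumerate_cons]
        cases part with
        | some p => simp
        | none =>
          by_cases hp1 : PySem.Chars.isIn name.toList e.toList = true
          · simp [hp1, PySem.Str.isIn]
          · by_cases hp2 : PySem.Chars.isIn e.toList name.toList = true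
            · simp [hp1, hp2, PySem.Str.isIn]
            · simp [hp1, hp2, PySem.Str.isIn]

theorem pvOne_eq (name : String) (env : List String) :
    pvAOne name env = pvBScan name env 0 none := by
  rw [pvBScan_eq]
  unfold pvAOne
  cases hidx : PySem.List.index? env name with
  | some k =>
    have hmem : name ∈ env := by
      rw [← PySem.List.index?_isSome_iff (xs := env) (v := name), hidx]
      rfl
    rw [if_pos (by simpa [List.contains_iff_mem] using hmem)]
    simp
  | none =>
    have hmem : name ∉ env := (PySem.List.index?_eq_none_iff env name).mp hidx
    rw [if_neg (by simpa [List.contains_iff_mem] using hmem)]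
    simp

-- A's append loop builds exactly the map over motion names
theorem pvFoldl_append_map (env : List String) :
    ∀ (l : List String) (acc : List (Option Int)),
      l.foldl (fun acc name => acc ++ [pvAOne name env]) acc
        = acc ++ l.map (fun name => pvAOne name env)
  | [], acc => by simp
  | x :: xs, acc => by
    simp only [List.foldl_cons, List.map_cons]
    rw [pvFoldl_append_map env xs]
    simp

-- ===== VERDICT (by name: the statement is the Claim_ definition above) =====
theorem map_joints_to_env_py_spec : Claim_equal_map_joints_to_env_py := by
  intro m env _
  unfold Spec_map_joints_to_env_py map_joints_to_env_py map_joints_to_env_py_alt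
  rw [pvFoldl_append_map env m []]
  simp [pvOne_eq]
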